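-- pv_equiv track=rewrite | github.com/Louw115/neurop-forge | neurop_forge/sources/ui_patterns.py | build_breadcrumb
-- ===== SOURCE A (Python) =====
-- def build_breadcrumb(path: str, separator: str) -> list:
--     """Build breadcrumb items from a path."""
--     parts = path.strip("/").split("/")
--     items = []
--     current_path = ""
--     for part in parts:
--         if part:
--             current_path += "/" + part
--             items.append({"label": part.replace("-", " ").title(), "path": current_path})
--     return items
-- ===== SOURCE B (Python) =====
-- def build_breadcrumb(path: str, separator: str) -> list:
--     """Build breadcrumb items from a path."""
--     segs = [p for p in path.strip("/").split("/") if p]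
--     return [{"label": segs[i].replace("-", " ").title(),
--              "path": "/" + "/".join(segs[:i + 1])}
--             for i in range(len(segs))]
-- ===== Notes on version B (the rewrite author's own statement) =====
-- stated objective: alternative
-- what changed: B filters the non-empty segments first and derives each breadcrumb's path directly as '/' + '/'.join of a prefix of the segment list, instead of threading a running current_path accumulator through a loop that also does the filtering.
import Mathlib
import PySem

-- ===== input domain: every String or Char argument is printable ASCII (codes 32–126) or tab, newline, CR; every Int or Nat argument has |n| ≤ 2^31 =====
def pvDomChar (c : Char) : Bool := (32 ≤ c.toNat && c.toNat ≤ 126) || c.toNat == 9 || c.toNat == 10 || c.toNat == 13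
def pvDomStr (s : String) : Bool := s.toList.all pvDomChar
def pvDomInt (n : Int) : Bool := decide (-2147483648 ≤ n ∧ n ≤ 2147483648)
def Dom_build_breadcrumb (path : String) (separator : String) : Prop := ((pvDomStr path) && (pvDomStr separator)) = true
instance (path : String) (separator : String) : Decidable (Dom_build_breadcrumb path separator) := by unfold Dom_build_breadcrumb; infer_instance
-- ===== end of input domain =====

-- B derives each breadcrumb path directly as '/' + '/'.join of a prefix of the filtered
-- segment list instead of threading a running current_path accumulator (objective: alternative decomposition).

-- hand port of Python str.title(), exact on the ASCII domain (cased character = ASCII letter there)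
def pyTitleChars : Bool → List Char → List Char
  | _, [] => []
  | prevCased, c :: rest =>
    if c.isAlpha then (if prevCased then c.toLower else c.toUpper) :: pyTitleChars true rest
    else c :: pyTitleChars false rest

def pyTitle (s : String) : String := String.ofList (pyTitleChars false s.toList)

-- ===== PORT A =====
-- path.strip("/").split("/"): separator "/" ≠ "", so Str.split? is `some`; getD [] is unreachable
def build_breadcrumb (path : String) (separator : String) : List (List (String × String)) :=
  let parts := (PySem.Str.split? (PySem.Str.stripChars path "/") "/").getD []
  (parts.foldl
    (fun (st : List (List (String × String)) × String) part =>
      if part ≠ "" then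
        let cur := st.2 ++ "/" ++ part
        (st.1 ++ [[("label", pyTitle (PySem.Str.replace part "-" " ")), ("path", cur)]], cur)
      else st)
    ([], "")).1

-- ===== PORT B =====
def build_breadcrumb_alt (path : String) (separator : String) : List (List (String × String)) :=
  let segs := ((PySem.Str.split? (PySem.Str.stripChars path "/") "/").getD []).filter (fun p => p ≠ "")
  (List.range segs.length).map (fun i =>
    [("label", pyTitle (PySem.Str.replace (segs.getD i "") "-" " ")),
     ("path", "/" ++ PySem.Str.join "/" (segs.take (i + 1)))])

-- ===== PRECONDITION & SPEC =====
def Spec_build_breadcrumb (path : String) (separator : String) (out : List (List (String × String))) : Prop := out = build_breadcrumb_alt path separator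
instance (path : String) (separator : String) (out : List (List (String × String))) : Decidable (Spec_build_breadcrumb path separator out) := by unfold Spec_build_breadcrumb; infer_instance

-- ===== CLAIM (what is proved, stated in full; the proofs are below) =====
def Claim_equal_build_breadcrumb : Prop := ∀ (path : String) (separator : String), Dom_build_breadcrumb path separator → Spec_build_breadcrumb path separator (build_breadcrumb path separator)

-- ===== LEMMAS AND PROOFS =====

-- the step function of A's loop, named for the proofs (definitionally the lambda in the port)
def bcStep (st : List (List (String × String)) × String) (part : String) :
    List (List (String × String)) × String :=
  if part ≠ "" then
    let cur := st.2 ++ "/" ++ part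
    (st.1 ++ [[("label", pyTitle (PySem.Str.replace part "-" " ")), ("path", cur)]], cur)
  else st

def bcItem (s p : String) : List (String × String) :=
  [("label", pyTitle (PySem.Str.replace s "-" " ")), ("path", p)]

lemma bc_join_singleton (s : String) : PySem.Str.join "/" [s] = s := by
  apply String.toList_inj.mp
  simp [PySem.Str.toList_join, PySem.Chars.join_singleton]

lemma bc_join_cons (s : String) (l : List String) (h : l ≠ []) :
    PySem.Str.join "/" (s :: l) = s ++ "/" ++ PySem.Str.join "/" l := by
  cases l with
  | nil => exact absurd rfl h
  | cons b t =>
      apply String.toList_inj.mp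
      simp [PySem.Str.toList_join, PySem.Chars.join_cons_cons, String.toList_append]

-- A's loop ignores empty parts: folding over parts = folding over the filtered parts
lemma bc_foldl_filter (parts : List String) (st : List (List (String × String)) × String) :
    parts.foldl bcStep st = (parts.filter (fun p => p ≠ "")).foldl bcStep st := by
  induction parts generalizing st with
  | nil => rfl
  | cons p rest ih =>
      by_cases hp : p = ""
      · subst hp
        simpa [bcStep] using ih st
      · simp [hp, List.foldl_cons, ih]

-- main invariant: A's accumulator run over nonempty segments equals B's prefix-join form
lemma bc_loop_eq (segs : List String) (h : ∀ s ∈ segs, s ≠ "")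
    (items : List (List (String × String))) (cur : String) :
    (segs.foldl bcStep (items, cur)).1 =
      items ++ (List.range segs.length).map
        (fun i => bcItem (segs.getD i "") (cur ++ "/" ++ PySem.Str.join "/" (segs.take (i + 1)))) := by
  induction segs generalizing items cur with
  | nil => simp
  | cons s rest ih =>
      have hs : s ≠ "" := h s (List.mem_cons_self ..)
      have hrest : ∀ x ∈ rest, x ≠ "" := fun x hx => h x (List.mem_cons_of_mem _ hx)
      rw [List.foldl_cons]
      have hstep : bcStep (items, cur) s =
          (items ++ [bcItem s (cur ++ "/" ++ s)], cur ++ "/" ++ s) := by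
        simp [bcStep, bcItem, hs]
      rw [hstep, ih hrest]
      rw [List.length_cons, List.range_succ_eq_map, List.map_cons, List.map_map]
      simp only [List.getD_cons_zero, List.take_succ_cons, List.take_zero, bc_join_singleton]
      rw [List.append_assoc, List.singleton_append]
      congr 1
      congr 1
      apply List.map_congr_left
      intro i hi
      have hi' : i < rest.length := List.mem_range.mp hi
      have htk : rest.take (i + 1) ≠ [] := by
        cases rest with
        | nil => simp at hi'
        | cons a t => simp [List.take_succ_cons]
      simp only [Function.comp_apply, List.getD_cons_succ]
      rw [bc_join_cons s _ htk]
      congr 1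
      apply String.toList_inj.mp
      simp [String.toList_append]

-- ===== VERDICT (by name: the statement is the Claim_ definition above) =====
theorem build_breadcrumb_spec : Claim_equal_build_breadcrumb := by
  intro path separator _
  unfold Spec_build_breadcrumb build_breadcrumb build_breadcrumb_alt
  set parts := (PySem.Str.split? (PySem.Str.stripChars path "/") "/").getD [] with hparts
  show (parts.foldl bcStep ([], "")).1 = _
  rw [bc_foldl_filter]
  rw [bc_loop_eq (parts.filter (fun p => p ≠ "")) (by intro s hs; simpa using (List.mem_filter.mp hs).2) [] ""]
  simp only [List.nil_append]
  apply List.map_congr_left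
  intro i _
  simp [bcItem]
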